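-- pv_equiv track=rewrite | github.com/Tixul/Ngpcraft_Engine | core/project_model.py | scene_pal_estimate
-- ===== SOURCE A (Python) =====
-- def scene_pal_estimate(scene: dict) -> int:
--     """Estimate palette slots for a scene (1 per sprite, dedup by fixed_palette)."""
--     seen: set[str] = set()
--     count = 0
--     for spr in scene.get("sprites", []):
--         fp = spr.get("fixed_palette") or ""
--         if fp and fp in seen:
--             continue  # shared palette
--         count += 1
--         if fp:
--             seen.add(fp)
--     return count
-- ===== SOURCE B (Python) =====
-- def scene_pal_estimate(scene: dict) -> int:
--     """Estimate palette slots for a scene (1 per sprite, dedup by fixed_palette)."""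
--     sprites = list(scene.get("sprites", []))
--     fps = [spr.get("fixed_palette") or "" for spr in sprites]
--     distinct = {fp for fp in fps if fp}
--     return len(distinct) + sum(1 for fp in fps if not fp)
-- ===== Notes on version B (the rewrite author's own statement) =====
-- stated objective: simpler
-- what changed: Replaces the stateful loop (seen-set plus conditional counter with continue) by a closed formula: number of distinct truthy fixed_palette values plus number of sprites with a falsy fixed_palette, computed with one set comprehension and one sum.
import Mathlib
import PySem

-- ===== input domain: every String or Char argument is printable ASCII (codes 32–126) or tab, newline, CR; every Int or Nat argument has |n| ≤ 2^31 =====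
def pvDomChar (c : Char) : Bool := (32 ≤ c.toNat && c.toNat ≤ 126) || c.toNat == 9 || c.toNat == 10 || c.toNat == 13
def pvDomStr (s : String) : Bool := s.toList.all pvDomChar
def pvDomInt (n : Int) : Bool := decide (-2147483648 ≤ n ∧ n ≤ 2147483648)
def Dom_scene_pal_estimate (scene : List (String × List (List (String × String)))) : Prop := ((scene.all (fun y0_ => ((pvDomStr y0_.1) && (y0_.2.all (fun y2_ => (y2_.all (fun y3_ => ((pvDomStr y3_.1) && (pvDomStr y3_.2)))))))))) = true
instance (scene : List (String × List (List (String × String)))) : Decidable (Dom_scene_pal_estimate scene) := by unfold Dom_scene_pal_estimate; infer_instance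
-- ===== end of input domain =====

-- B computes the same count by a closed formula (distinct truthy palettes + falsy-palette sprites)
-- instead of A's stateful seen-set loop; objective: simpler. Same O(n) cost.

-- ===== PORT A =====
def scene_pal_estimate (scene : List (String × List (List (String × String)))) : Int :=
  let sprites := (PySem.Dict.mk scene).getD "sprites" []
  let r := sprites.foldl (fun (st : PySem.Set String × Int) spr =>
      let fp := (PySem.Dict.mk spr).getD "fixed_palette" ""
      if fp ≠ "" ∧ PySem.Set.contains st.1 fp = true then st
      else ((if fp ≠ "" then PySem.Set.add st.1 fp else st.1), st.2 + 1))
    (PySem.Set.empty, 0)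
  r.2

-- ===== PORT B =====
def scene_pal_estimate_alt (scene : List (String × List (List (String × String)))) : Int :=
  let sprites := (PySem.Dict.mk scene).getD "sprites" []
  let fps := sprites.map (fun spr => (PySem.Dict.mk spr).getD "fixed_palette" "")
  let distinct := PySem.Set.ofList (fps.filter (fun fp => fp ≠ ""))
  (PySem.Set.len distinct : Int) + (fps.countP (fun fp => fp = "") : Int)

-- ===== PRECONDITION & SPEC =====
def Spec_scene_pal_estimate (scene : List (String × List (List (String × String)))) (out : Int) : Prop := out = scene_pal_estimate_alt scene
instance (scene : List (String × List (List (String × String)))) (out : Int) : Decidable (Spec_scene_pal_estimate scene out) := by unfold Spec_scene_pal_estimate; infer_instance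

-- ===== CLAIM (what is proved, stated in full; the proofs are below) =====
def Claim_equal_scene_pal_estimate : Prop := ∀ (scene : List (String × List (List (String × String)))), Dom_scene_pal_estimate scene → Spec_scene_pal_estimate scene (scene_pal_estimate scene)

-- ===== LEMMAS AND PROOFS =====

-- A's loop body, abstracted over the already-extracted fixed_palette string
def palStep (st : PySem.Set String × Int) (fp : String) : PySem.Set String × Int :=
  if fp ≠ "" ∧ PySem.Set.contains st.1 fp = true then st
  else ((if fp ≠ "" then PySem.Set.add st.1 fp else st.1), st.2 + 1)

lemma palStep_main (fps : List String) (s : PySem.Set String) (c : Int) :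
    (fps.foldl palStep (s, c)).2 =
      c + (fps.countP (fun fp => fp = "") : Int)
        + (((fps.filter (fun fp => fp ≠ "")).foldl PySem.Set.add s).length : Int)
        - (s.length : Int) := by
  induction fps generalizing s c with
  | nil => simp
  | cons fp rest ih =>
    by_cases hfp : fp = ""
    · subst hfp
      rw [List.foldl_cons, show palStep (s, c) "" = (s, c + 1) from by simp [palStep], ih]
      simp
      ring
    · by_cases hmem : PySem.Set.contains s fp = true
      · have hm : fp ∈ s := by simpa [PySem.Set.contains] using hmem
        rw [List.foldl_cons, show palStep (s, c) fp = (s, c) from by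
          simp [palStep, hfp, hm], ih]
        have hadd : PySem.Set.add s fp = s := by simp [PySem.Set.add, hm]
        simp [hfp, hadd]
      · have hm : fp ∉ s := by simpa [PySem.Set.contains] using hmem
        rw [List.foldl_cons, show palStep (s, c) fp = (PySem.Set.add s fp, c + 1) from by
          simp [palStep, hfp, hm], ih]
        have hlen : (PySem.Set.add s fp).length = s.length + 1 := by
          simp [PySem.Set.add, hm]
        simp [hfp, hlen]
        ring

-- ===== VERDICT (by name: the statement is the Claim_ definition above) =====
theorem scene_pal_estimate_spec : Claim_equal_scene_pal_estimate := by
  intro scene _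
  unfold Spec_scene_pal_estimate scene_pal_estimate scene_pal_estimate_alt
  simp only []
  rw [show (fun (st : PySem.Set String × Int) spr =>
      let fp := (PySem.Dict.mk spr).getD "fixed_palette" ""
      if fp ≠ "" ∧ PySem.Set.contains st.1 fp = true then st
      else ((if fp ≠ "" then PySem.Set.add st.1 fp else st.1), st.2 + 1))
    = (fun st spr => palStep st ((PySem.Dict.mk spr).getD "fixed_palette" "")) from rfl]
  rw [← List.foldl_map (f := fun spr => (PySem.Dict.mk spr).getD "fixed_palette" "")]
  rw [palStep_main, PySem.Set.ofList_eq_foldl]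
  simp [PySem.Set.len, PySem.Set.empty]
  ring
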